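-- pv_equiv track=rewrite | github.com/zybzyb-123/deeplearn | lstm_prefetch.py | prepare_lstm_data
-- ===== SOURCE A (Python) =====
-- def prepare_lstm_data(trace, window_size=5):
--     X, y = [], []
--     for i in range(window_size, len(trace)):
--         seq = [trace[i - j][1] for j in range(window_size, 0, -1)]
--         target = trace[i][1]
--         X.append(seq)
--         y.append(target)
--     return X, y
-- ===== SOURCE B (Python) =====
-- def prepare_lstm_data(trace, window_size=5):
--     vals = [v for _, v in trace]
--     X = [vals[i:i + window_size] for i in range(len(vals) - window_size)]
--     y = vals[window_size:]
--     return X, y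
-- ===== Notes on version B (the rewrite author's own statement) =====
-- stated objective: simpler
-- what changed: B projects the value series once and builds each window as a single slice indexed from the window start (and y as one tail slice), instead of A's per-window inner comprehension that recomputes each element's tuple index with i-j arithmetic over a countdown range.
-- intended difference: For negative window_size (with -len(trace) <= window_size so A returns), A returns len(trace)-window_size empty windows paired with targets read via negative-index wraparound, an artefact of range(window_size,0,-1) being empty; B returns the natural slicing reading (no windows, y the last |window_size| values), which is at least as defensible on this unspecified corner. — e.g. on prepare_lstm_data([(0, 1), (0, 2)], -1): A returns ([[], [], []], [2, 1, 2]), B returns ([[1], [], []], [2])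
-- outside the precondition, e.g. on prepare_lstm_data([(0, 1)], -2): A raises IndexError, B returns ([[], [], []], [1])
import Mathlib
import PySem

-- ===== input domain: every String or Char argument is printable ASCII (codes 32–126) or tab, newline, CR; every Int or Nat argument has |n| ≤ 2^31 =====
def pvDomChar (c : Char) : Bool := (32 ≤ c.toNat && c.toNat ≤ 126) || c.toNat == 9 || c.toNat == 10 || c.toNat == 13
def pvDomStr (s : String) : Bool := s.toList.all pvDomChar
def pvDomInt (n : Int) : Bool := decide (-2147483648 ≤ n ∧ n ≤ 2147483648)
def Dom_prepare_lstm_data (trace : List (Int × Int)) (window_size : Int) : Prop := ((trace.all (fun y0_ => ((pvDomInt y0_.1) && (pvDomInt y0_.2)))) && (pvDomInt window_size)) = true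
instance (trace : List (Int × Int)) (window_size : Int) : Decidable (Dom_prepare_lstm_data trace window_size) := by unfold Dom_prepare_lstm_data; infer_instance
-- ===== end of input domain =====

-- B replaces A's per-window index arithmetic by one value projection plus slices (objective: simpler).

-- ===== PORT A =====
def prepare_lstm_data (trace : List (Int × Int)) (window_size : Int) : List (List Int) × List Int :=
  (PySem.List.pyRange window_size (trace.length : Int) 1).foldl
    (fun (acc : List (List Int) × List Int) i =>
      let seq := (PySem.List.pyRange window_size 0 (-1)).map
        (fun j => (PySem.List.pyGetD trace (i - j) (0, 0)).2)
      let target := (PySem.List.pyGetD trace i (0, 0)).2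
      (acc.1 ++ [seq], acc.2 ++ [target]))
    ([], [])

-- ===== PORT B =====
def prepare_lstm_data_alt (trace : List (Int × Int)) (window_size : Int) : List (List Int) × List Int :=
  let vals := trace.map (fun p => p.2)
  let X := (PySem.List.pyRange 0 ((vals.length : Int) - window_size) 1).map
    (fun i => PySem.List.slice vals (some i) (some (i + window_size)))
  let y := PySem.List.slice vals (some window_size) none
  (X, y)

-- ===== PRECONDITION & SPEC =====
-- Pre_ excludes exactly the inputs where A raises IndexError: window_size < -len(trace)
-- makes trace[i] raise at the loop's first (negative) index.
def Pre_prepare_lstm_data (trace : List (Int × Int)) (window_size : Int) : Prop :=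
  -(trace.length : Int) ≤ window_size
instance (trace : List (Int × Int)) (window_size : Int) : Decidable (Pre_prepare_lstm_data trace window_size) := by unfold Pre_prepare_lstm_data; infer_instance
def pvWitness_prepare_lstm_data : (List (Int × Int)) × Int := ([(1, 2), (3, 4), (5, 6)], 1)

-- For negative window_size A returns len(trace)-window_size empty windows paired with targets read
-- via negative-index wraparound (an artefact of range(window_size,0,-1) being empty); B returns the
-- natural slicing reading, at least as defensible on this unspecified corner.
def D_prepare_lstm_data (trace : List (Int × Int)) (window_size : Int) : Prop :=
  window_size < 0
instance (trace : List (Int × Int)) (window_size : Int) : Decidable (D_prepare_lstm_data trace window_size) := by unfold D_prepare_lstm_data; infer_instance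

def Spec_prepare_lstm_data (trace : List (Int × Int)) (window_size : Int) (out : List (List Int) × List Int) : Prop := ¬ D_prepare_lstm_data trace window_size → out = prepare_lstm_data_alt trace window_size
instance (trace : List (Int × Int)) (window_size : Int) (out : List (List Int) × List Int) : Decidable (Spec_prepare_lstm_data trace window_size out) := by unfold Spec_prepare_lstm_data; infer_instance

def pvDiffWitness_prepare_lstm_data : (List (Int × Int)) × Int := ([(0, 1), (0, 2)], -1)
def pvDiffWitnessOut_prepare_lstm_data : (List (List Int) × List Int) × (List (List Int) × List Int) :=
  (([[], [], []], [2, 1, 2]), ([[1], [], []], [2]))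

-- ===== CLAIM (what is proved, stated in full; the proofs are below) =====
def Claim_unchanged_prepare_lstm_data : Prop := ∀ (trace : List (Int × Int)) (window_size : Int), Dom_prepare_lstm_data trace window_size → Pre_prepare_lstm_data trace window_size → Spec_prepare_lstm_data trace window_size (prepare_lstm_data trace window_size)
def Claim_changed_prepare_lstm_data : Prop := Dom_prepare_lstm_data (pvDiffWitness_prepare_lstm_data.1) (pvDiffWitness_prepare_lstm_data.2) ∧ Pre_prepare_lstm_data (pvDiffWitness_prepare_lstm_data.1) (pvDiffWitness_prepare_lstm_data.2) ∧ D_prepare_lstm_data (pvDiffWitness_prepare_lstm_data.1) (pvDiffWitness_prepare_lstm_data.2) ∧ prepare_lstm_data (pvDiffWitness_prepare_lstm_data.1) (pvDiffWitness_prepare_lstm_data.2) = pvDiffWitnessOut_prepare_lstm_data.1 ∧ prepare_lstm_data_alt (pvDiffWitness_prepare_lstm_data.1) (pvDiffWitness_prepare_lstm_data.2) = pvDiffWitnessOut_prepare_lstm_data.2 ∧ pvDiffWitnessOut_prepare_lstm_data.1 ≠ pvDiffWitnessOut_prepare_lstm_data.2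
def Claim_exact_prepare_lstm_data : Prop := ∀ (trace : List (Int × Int)) (window_size : Int), Dom_prepare_lstm_data trace window_size → Pre_prepare_lstm_data trace window_size → D_prepare_lstm_data trace window_size → prepare_lstm_data trace window_size ≠ prepare_lstm_data_alt trace window_size

-- ===== LEMMAS AND PROOFS =====

-- window pointwise: A's inner countdown comprehension equals B's slice (nonnegative window)
lemma pv_window_eq (trace : List (Int × Int)) (w : Int) (hw : 0 ≤ w) (k : Nat)
    (hk : k < ((trace.length : Int) - w).toNat) :
    (PySem.List.pyRange w 0 (-1)).map (fun j => (PySem.List.pyGetD trace ((w + (k:Int)) - j) (0, 0)).2)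
      = PySem.List.slice (trace.map (fun p => p.2)) (some (0 + (k:Int))) (some ((0 + (k:Int)) + w)) := by
  lift w to Nat using hw with wn
  have hbound : k + wn ≤ trace.length := by omega
  rw [show ((0:Int) + (k:Int)) = (k:Int) by ring,
      PySem.List.slice_natCast_add, PySem.List.pyRange_neg_one, List.map_map]
  apply List.ext_getElem
  · simp
    omega
  · intro t h1 h2
    simp only [List.getElem_map, List.getElem_range, Function.comp_apply]
    have ht : t < wn := by simp at h1; omega
    have : ((wn:Int) + (k:Int)) - ((wn:Int) - (t:Int)) = ((k + t : Nat) : Int) := by push_cast; ring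
    rw [this, PySem.List.pyGetD_natCast]
    rw [List.getElem_take, List.getElem_drop]
    have hlt : k + t < trace.length := by omega
    rw [List.getD_eq_getElem _ _ hlt]
    simp [Nat.add_comm k t]

-- A = B for nonnegative window_size
lemma pv_main_eq (trace : List (Int × Int)) (w : Int) (hw : 0 ≤ w) :
    prepare_lstm_data trace w = prepare_lstm_data_alt trace w := by
  unfold prepare_lstm_data prepare_lstm_data_alt
  rw [PySem.List.foldl_prod_mk
      (f := fun (a : List (List Int)) (i : Int) => a ++ [(PySem.List.pyRange w 0 (-1)).map
        (fun j => (PySem.List.pyGetD trace (i - j) (0, 0)).2)])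
      (g := fun (a : List Int) (i : Int) => a ++ [(PySem.List.pyGetD trace i (0, 0)).2]),
     PySem.List.foldl_append_singleton_eq_map, PySem.List.foldl_append_singleton_eq_map]
  simp only [List.nil_append, List.length_map]
  rw [Prod.mk.injEq]
  constructor
  · -- X side
    rw [PySem.List.pyRange_one w (trace.length : Int),
        PySem.List.pyRange_one 0 ((trace.length : Int) - w), List.map_map, List.map_map]
    rw [show (trace.length:Int) - w - 0 = (trace.length:Int) - w by ring]
    apply List.map_congr_left
    intro k hk
    have hk' : k < ((trace.length : Int) - w).toNat := by simpa using hk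
    simpa using pv_window_eq trace w hw k hk'
  · -- y side
    rw [PySem.List.slice_from _ hw, PySem.List.pyRange_one w (trace.length : Int), List.map_map]
    apply List.ext_getElem
    · simp; omega
    · intro t h1 h2
      simp only [List.getElem_map, List.getElem_range, Function.comp_apply, List.getElem_drop]
      have h1' : t < ((trace.length:Int) - w).toNat := by simpa using h1
      have : w + (t:Int) = ((w.toNat + t : Nat) : Int) := by push_cast; omega
      rw [this, PySem.List.pyGetD_natCast]
      have hlt : w.toNat + t < trace.length := by omega
      rw [List.getD_eq_getElem _ _ hlt]

-- for negative window_size the y components even have different lengths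
lemma pv_tight (trace : List (Int × Int)) (w : Int) (hD : w < 0) :
    prepare_lstm_data trace w ≠ prepare_lstm_data_alt trace w := by
  intro h
  have h2 := congrArg (fun p => p.2.length) h
  simp only [prepare_lstm_data, prepare_lstm_data_alt] at h2
  rw [PySem.List.foldl_prod_mk
      (f := fun (a : List (List Int)) (i : Int) => a ++ [(PySem.List.pyRange w 0 (-1)).map
        (fun j => (PySem.List.pyGetD trace (i - j) (0, 0)).2)])
      (g := fun (a : List Int) (i : Int) => a ++ [(PySem.List.pyGetD trace i (0, 0)).2])] at h2
  simp only [PySem.List.foldl_append_singleton_eq_map, PySem.List.slice_some_none,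
    List.nil_append, List.length_map, PySem.List.length_pyRange_one, List.length_drop] at h2
  have hc : PySem.List.clampIdx (trace.map (fun p => p.2)).length w ≤ trace.length := by
    have := PySem.List.clampIdx_le ((trace.map (fun p => p.2)).length) w
    simp at this
    omega
  omega

-- ===== VERDICT (by name: the statement is the Claim_ definition above) =====
theorem prepare_lstm_data_spec : Claim_unchanged_prepare_lstm_data := by
  intro trace w _ _
  unfold Spec_prepare_lstm_data D_prepare_lstm_data
  intro hnD
  exact pv_main_eq trace w (by omega)
theorem prepare_lstm_data_changed : Claim_changed_prepare_lstm_data := by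
  unfold Claim_changed_prepare_lstm_data; decide
theorem prepare_lstm_data_tight : Claim_exact_prepare_lstm_data := by
  intro trace w _ _ hD
  exact pv_tight trace w hD
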